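-- pv_equiv track=rewrite | github.com/ZiningZhu/Leetcode | 659-split-array/Solution.py | check
-- ===== SOURCE A (Python) =====
-- def check(bag):
--     # Simulate -- start and end depicts the starting and ending indices of objects
--     start = []
--     end = []
--     prev = 0
--     for i, c in enumerate(bag):
--         if (c > prev):
--             start += ([i]*(c-prev))
--         elif (c < prev):
--             end += ([i-1] * (prev-c))
--         prev = c
--     end += ([i] * prev)
--     ans = (len(start) == len(end)) and all(e-s>=2 for s,e in zip(start, end))
--     #print ("bag={}, start={}, end={}, ans={}".format(bag, start, end, ans))
--     return ans
-- ===== SOURCE B (Python) =====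
-- from collections import deque
--
-- def check(bag):
--     # Queue of (start_index, count) of still-open runs; close FIFO without
--     # expanding the per-object start/end lists.
--     q = deque()
--     ok = True
--     prev = 0
--     for i, c in enumerate(bag):
--         d = c - prev
--         if d > 0:
--             q.append([i, d])
--         elif d < 0:
--             need = -d
--             while need > 0 and q:
--                 s, cnt = q[0]
--                 if i - 1 - s < 2:
--                     ok = False
--                 if cnt <= need:
--                     q.popleft()
--                     need -= cnt
--                 else:
--                     q[0][1] = cnt - need
--                     need = 0
--             if need > 0:
--                 ok = False
--         prev = c
--     # close whatever is still open at the last index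
--     e = len(bag) - 1
--     need = prev
--     while need > 0 and q:
--         s, cnt = q[0]
--         if e - s < 2:
--             ok = False
--         if cnt <= need:
--             q.popleft()
--             need -= cnt
--         else:
--             q[0][1] = cnt - need
--             need = 0
--     if need > 0:
--         ok = False
--     return ok and prev >= 0 and not q
-- ===== Notes on version B (the rewrite author's own statement) =====
-- stated objective: faster
-- what changed: Instead of materialising one start-index and one end-index per object (lists of size sum(bag)) and zipping them, B keeps a FIFO queue of run-length-compressed open intervals (start_index, count) and closes them in place, so the work is per change of count, not per object.
import Mathlib
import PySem

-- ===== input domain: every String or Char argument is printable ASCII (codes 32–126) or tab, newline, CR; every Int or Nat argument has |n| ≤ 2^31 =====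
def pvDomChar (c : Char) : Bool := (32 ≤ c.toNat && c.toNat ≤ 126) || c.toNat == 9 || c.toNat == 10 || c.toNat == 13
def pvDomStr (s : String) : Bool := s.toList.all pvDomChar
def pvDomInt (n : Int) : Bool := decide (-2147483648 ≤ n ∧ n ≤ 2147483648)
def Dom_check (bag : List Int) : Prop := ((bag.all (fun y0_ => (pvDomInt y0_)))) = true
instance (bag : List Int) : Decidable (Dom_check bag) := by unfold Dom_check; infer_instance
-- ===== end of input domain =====

-- B changes the algorithm: a FIFO queue of run-length-compressed (start_index,count) open
-- intervals replaces A's per-object start/end lists; measurably faster (per change, not per object).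

-- ===== PORT A =====
-- loop body of A's 'for i, c in enumerate(bag)': state (start, end, prev, i)
def stepA (acc : List Int × List Int × Int × Int) (ic : Int × Int) :
    List Int × List Int × Int × Int :=
  let (start, end_, prev, _) := acc
  let (i, c) := ic
  if c > prev then (start ++ List.replicate (c - prev).toNat i, end_, c, i)
  else if c < prev then (start, end_ ++ List.replicate (prev - c).toNat (i - 1), c, i)
  else (start, end_, c, i)

-- 'all(e-s>=2 for s,e in zip(start, end))': Python's zip is a lazy pairwise walk, so the
-- faithful port walks both lists together, short-circuiting like all() does
def zipAllGE2 : List Int → List Int → Bool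
  | s :: ss, e :: es => if e - s ≥ 2 then zipAllGE2 ss es else false
  | _, _ => true

def check (bag : List Int) : Bool :=
  let st := (PySem.List.enumerate bag).foldl stepA ([], [], 0, 0)
  let (start, end_, prev, i) := st
  let end_ := end_ ++ List.replicate prev.toNat i
  (start.length == end_.length) && zipAllGE2 start end_

-- ===== PORT B =====
-- B's inner 'while need > 0 and q' closing loop (followed by 'if need > 0: ok = False')
def closeB (e : Int) : List (Int × Int) → Int → Bool → List (Int × Int) × Bool
  | [], need, ok => if 0 < need then ([], false) else ([], ok)
  | (s, cnt) :: rest, need, ok =>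
    if need ≤ 0 then ((s, cnt) :: rest, ok)
    else
      let ok' := if e - s < 2 then false else ok
      if cnt ≤ need then closeB e rest (need - cnt) ok'
      else ((s, cnt - need) :: rest, ok')

-- loop body of B's 'for i, c in enumerate(bag)': state (q, ok, prev)
def stepB (acc : List (Int × Int) × Bool × Int) (ic : Int × Int) :
    List (Int × Int) × Bool × Int :=
  let (q, ok, prev) := acc
  let (i, c) := ic
  let d := c - prev
  if d > 0 then (q ++ [(i, d)], ok, c)
  else if d < 0 then
    let (q', ok') := closeB (i - 1) q (-d) ok
    (q', ok', c)
  else (q, ok, c)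

def check_alt (bag : List Int) : Bool :=
  let st := (PySem.List.enumerate bag).foldl stepB ([], true, 0)
  let (q, ok, prev) := st
  let (q', ok') := closeB ((bag.length : Int) - 1) q prev ok
  ok' && decide (prev ≥ 0) && q'.isEmpty

-- ===== PRECONDITION & SPEC =====
-- Pre_ excludes only the empty list, on which A raises NameError (its loop variable i is
-- used after a loop that never ran).
def Pre_check (bag : List Int) : Prop := bag ≠ []
instance (bag : List Int) : Decidable (Pre_check bag) := by unfold Pre_check; infer_instance
def pvWitness_check : List Int := ([3, 3, 3])

def Spec_check (bag : List Int) (out : Bool) : Prop := out = check_alt bag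
instance (bag : List Int) (out : Bool) : Decidable (Spec_check bag out) := by unfold Spec_check; infer_instance

-- ===== CLAIM (what is proved, stated in full; the proofs are below) =====
def Claim_equal_check : Prop := ∀ (bag : List Int), Dom_check bag → Pre_check bag → Spec_check bag (check bag)

-- ===== LEMMAS AND PROOFS =====

-- the multiset of open start indices a run-length queue represents
def expand (q : List (Int × Int)) : List Int :=
  q.flatMap (fun p => List.replicate p.2.toNat p.1)

def posCnt (q : List (Int × Int)) : Prop := ∀ p ∈ q, (0 : Int) < p.2

def pairsAll (S E : List Int) : Bool := (S.zip E).all (fun p => decide (p.2 - p.1 ≥ 2))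

theorem zipAll_eq : ∀ (S E : List Int), zipAllGE2 S E = pairsAll S E := by
  intro S
  induction S with
  | nil => intro E; cases E <;> simp [zipAllGE2, pairsAll]
  | cons s S ih =>
    intro E
    cases E with
    | nil => simp [zipAllGE2, pairsAll]
    | cons e E =>
      simp only [zipAllGE2, pairsAll, List.zip_cons_cons, List.all_cons]
      by_cases h : e - s ≥ 2
      · simp [h, ih E, pairsAll]
      · simp [h]

-- B's state is faithful to A's: either no close has ever underflowed (good) and the queue is
-- exactly the unmatched suffix of A's start list, or some close underflowed (bad) and a
-- failing pair index k is remembered.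
def InvGood (S E : List Int) (p : Int) (q : List (Int × Int)) (ok : Bool) : Prop :=
  ok = pairsAll S E ∧ expand q = S.drop E.length ∧ E.length ≤ S.length ∧
    p = (S.length : Int) - (E.length : Int)

def InvBad (n0 : Int) (S E : List Int) (ok : Bool) : Prop :=
  ok = false ∧ ∃ k : Nat, k < E.length ∧
    ((k < S.length ∧ E.getD k 0 - S.getD k 0 < 2) ∨ (S.length ≤ k ∧ E.getD k 0 < n0))

def LoopInv (n0 : Int) (a : List Int × List Int × Int × Int)
    (b : List (Int × Int) × Bool × Int) : Prop :=
  a.2.2.1 = b.2.2 ∧ posCnt b.1 ∧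
    (InvGood a.1 a.2.1 a.2.2.1 b.1 b.2.1 ∨ InvBad n0 a.1 a.2.1 b.2.1)

theorem closeB_nonpos (e : Int) (q : List (Int × Int)) (need : Int) (ok : Bool)
    (h : need ≤ 0) : closeB e q need ok = (q, ok) := by
  cases q with
  | nil => simp [closeB]; omega
  | cons p rest => obtain ⟨s, cnt⟩ := p; simp [closeB, h]

theorem closeB_false (e : Int) : ∀ (q : List (Int × Int)) (need : Int),
    (closeB e q need false).2 = false := by
  intro q
  induction q with
  | nil => intro need; simp [closeB]
  | cons p rest ih =>
    intro need
    obtain ⟨s, cnt⟩ := p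
    simp only [closeB]
    split_ifs <;> simp [ih]

theorem closeB_posCnt (e : Int) : ∀ (q : List (Int × Int)) (need : Int) (ok : Bool),
    posCnt q → posCnt (closeB e q need ok).1 := by
  intro q
  induction q with
  | nil => intro need ok _; simp [closeB]; split_ifs <;> simp [posCnt]
  | cons p rest ih =>
    intro need ok hpos
    obtain ⟨s, cnt⟩ := p
    have hrest : posCnt rest := fun x hx => hpos x (List.mem_cons_of_mem _ hx)
    have hcnt : (0 : Int) < cnt := hpos (s, cnt) List.mem_cons_self
    simp only [closeB]
    split_ifs <;>
      first
        | exact hpos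
        | exact ih _ _ hrest
        | (intro x hx
           rcases List.mem_cons.mp hx with h | h
           · subst h; simp; omega
           · exact hrest x h)

theorem expand_nil_of_posCnt : ∀ (q : List (Int × Int)), posCnt q → expand q = [] → q = [] := by
  intro q hpos hexp
  cases q with
  | nil => rfl
  | cons p rest =>
    obtain ⟨s, cnt⟩ := p
    have hcnt : (0 : Int) < cnt := hpos (s, cnt) List.mem_cons_self
    exfalso
    simp [expand] at hexp
    obtain ⟨h1, -⟩ := hexp
    omega

theorem zip_append_left_irrel : ∀ (S E X : List Int), E.length ≤ S.length →
    (S ++ X).zip E = S.zip E := by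
  intro S
  induction S with
  | nil =>
    intro E X h
    cases E with
    | nil => simp
    | cons e E => simp at h
  | cons s S ih =>
    intro E X h
    cases E with
    | nil => simp
    | cons e E =>
      simp only [List.cons_append, List.zip_cons_cons, List.cons.injEq, true_and]
      exact ih E X (by simpa using h)

theorem pairsAll_append_left (S X E : List Int) (h : E.length ≤ S.length) :
    pairsAll (S ++ X) E = pairsAll S E := by
  unfold pairsAll
  rw [zip_append_left_irrel S E X h]

theorem pairsAll_append_right (S E F : List Int) (h : E.length ≤ S.length) :
    pairsAll S (E ++ F) = (pairsAll S E && pairsAll (S.drop E.length) F) := by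
  have htl : (S.take E.length).length = E.length := by
    simp [List.length_take]; omega
  have hS : S = S.take E.length ++ S.drop E.length := (List.take_append_drop _ _).symm
  conv_lhs => rw [hS]
  unfold pairsAll
  rw [List.zip_append htl, List.all_append]
  congr 1
  rw [← zip_append_left_irrel (S.take E.length) E (S.drop E.length) (by omega), ← hS]

theorem pairsAll_replicate : ∀ (X : List Int) (m : Nat) (c : Int),
    pairsAll X (List.replicate m c) = (X.take m).all (fun s => decide (c - s ≥ 2)) := by
  intro X
  induction X with
  | nil => intro m c; simp [pairsAll]
  | cons x X ih =>
    intro m c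
    cases m with
    | zero => simp [pairsAll]
    | succ m =>
      have hstep : pairsAll (x :: X) (List.replicate (m + 1) c) =
          (decide (c - x ≥ 2) && pairsAll X (List.replicate m c)) := by
        simp [pairsAll, List.replicate_succ]
      rw [hstep, ih, List.take_succ_cons, List.all_cons]

theorem pairsAll_false_of (S E : List Int) (k : Nat) (hk1 : k < S.length)
    (hk2 : k < E.length) (hbad : E.getD k 0 - S.getD k 0 < 2) : pairsAll S E = false := by
  by_contra h
  rw [Bool.not_eq_false] at h
  have hlen : k < (S.zip E).length := by simp [List.length_zip]; omega
  have hmem : (S[k]'hk1, E[k]'hk2) ∈ S.zip E := by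
    have := List.getElem_zip (l := S) (l' := E) (i := k) (h := hlen)
    rw [← this]
    exact List.getElem_mem hlen
  have := List.all_eq_true.mp h _ hmem
  simp at this
  rw [List.getD_eq_getElem E 0 hk2, List.getD_eq_getElem S 0 hk1] at hbad
  omega

theorem closeB_spec (e : Int) : ∀ (q : List (Int × Int)) (need : Int) (ok : Bool),
    posCnt q → 0 < need →
    (need ≤ (expand q).length →
      ∃ q', closeB e q need ok =
          (q', ok && ((expand q).take need.toNat).all (fun s => decide (e - s ≥ 2))) ∧
        posCnt q' ∧ expand q' = (expand q).drop need.toNat) ∧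
    (((expand q).length : Int) < need → closeB e q need ok = ([], false)) := by
  intro q
  induction q with
  | nil =>
    intro need ok _ hneed
    constructor
    · intro h; simp [expand] at h; omega
    · intro _
      simp only [closeB, if_pos hneed]
  | cons p rest ih =>
    intro need ok hpos hneed
    obtain ⟨s, cnt⟩ := p
    have hrest : posCnt rest := fun x hx => hpos x (List.mem_cons_of_mem _ hx)
    have hcnt : (0 : Int) < cnt := hpos (s, cnt) List.mem_cons_self
    have hok' : (if e - s < 2 then false else ok) = (ok && decide (e - s ≥ 2)) := by
      split_ifs with h
      · simp [show ¬(e - s ≥ 2) by omega]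
      · simp [show e - s ≥ 2 by omega]
    have hexp : expand ((s, cnt) :: rest) = List.replicate cnt.toNat s ++ expand rest := by
      simp [expand]
    have hlrep : (List.replicate cnt.toNat s : List Int).length = cnt.toNat := by simp
    have hstep : closeB e ((s, cnt) :: rest) need ok =
        (if cnt ≤ need then closeB e rest (need - cnt) (ok && decide (e - s ≥ 2))
         else ((s, cnt - need) :: rest, ok && decide (e - s ≥ 2))) := by
      simp only [closeB, if_neg (by omega : ¬ need ≤ 0), hok']
    have hallrep : ∀ m : Nat, 0 < m →
        (List.replicate m s).all (fun t => decide (e - t ≥ 2)) = decide (e - s ≥ 2) := by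
      intro m hm
      cases m with
      | zero => omega
      | succ m => simp [List.all_replicate]
    constructor
    · intro hlen
      rw [hexp] at hlen
      rw [List.length_append, hlrep] at hlen
      by_cases hc : cnt ≤ need
      · rw [hstep, if_pos hc]
        by_cases h0 : need - cnt ≤ 0
        · have hnc : need = cnt := by omega
          rw [closeB_nonpos e rest _ _ h0]
          refine ⟨rest, ?_, hrest, ?_⟩
          · rw [hexp]
            have htake : (List.replicate cnt.toNat s ++ expand rest).take need.toNat =
                List.replicate cnt.toNat s := by
              rw [show need.toNat = (List.replicate cnt.toNat s : List Int).length by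
                rw [hlrep]; omega]
              exact List.take_left
            rw [htake, hallrep cnt.toNat (by omega)]
          · rw [hexp]
            rw [show need.toNat = (List.replicate cnt.toNat s : List Int).length by
              rw [hlrep]; omega]
            exact List.drop_left.symm
        · obtain ⟨q', heq, hq', hexp'⟩ :=
            (ih (need - cnt) (ok && decide (e - s ≥ 2)) hrest (by omega)).1
              (by simp at hlen ⊢; omega)
          refine ⟨q', ?_, hq', ?_⟩
          · rw [heq, hexp]
            congr 1
            rw [List.take_append, hlrep,
              show need.toNat - cnt.toNat = (need - cnt).toNat by omega,
              show (List.replicate cnt.toNat s : List Int).take need.toNat =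
                List.replicate cnt.toNat s from by
                  rw [List.take_replicate]; congr 1; omega,
              List.all_append, hallrep cnt.toNat (by omega), Bool.and_assoc]
          · rw [hexp', hexp, List.drop_append, hlrep,
              show need.toNat - cnt.toNat = (need - cnt).toNat by omega,
              show (List.replicate cnt.toNat s : List Int).drop need.toNat = [] from by
                rw [List.drop_replicate]; simp; omega]
            simp
      · rw [hstep, if_neg hc]
        refine ⟨(s, cnt - need) :: rest, ?_, ?_, ?_⟩
        · rw [hexp]
          congr 2
          rw [List.take_append, hlrep,
            show need.toNat - cnt.toNat = 0 by omega,
            show (List.replicate cnt.toNat s : List Int).take need.toNat =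
              List.replicate need.toNat s from by rw [List.take_replicate]; congr 1; omega]
          simp [hallrep need.toNat (by omega)]
        · intro x hx
          rcases List.mem_cons.mp hx with h | h
          · subst h; simp; omega
          · exact hrest x h
        · rw [hexp, List.drop_append, hlrep,
            show need.toNat - cnt.toNat = 0 by omega, List.drop_replicate]
          simp [expand]
          omega
    · intro hlen
      rw [hexp, List.length_append, hlrep] at hlen
      have hc : cnt ≤ need := by push_cast at hlen; omega
      rw [hstep, if_pos hc]
      by_cases h0 : need - cnt ≤ 0
      · exfalso; push_cast at hlen; omega
      · exact (ih (need - cnt) (ok && decide (e - s ≥ 2)) hrest (by omega)).2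
          (by push_cast at hlen ⊢; omega)

theorem step_inv (n0 x : Int) (a : List Int × List Int × Int × Int)
    (b : List (Int × Int) × Bool × Int) (h : LoopInv n0 a b) :
    LoopInv (n0 + 1) (stepA a (n0, x)) (stepB b (n0, x)) := by
  obtain ⟨S, E, p, il⟩ := a
  obtain ⟨q, ok, p'⟩ := b
  obtain ⟨hp, hq, hinv⟩ := h
  simp only at hp
  subst hp
  dsimp only at hq hinv
  rcases lt_trichotomy p x with hx | hx | hx
  · -- open step: x > p
    have hA : stepA (S, E, p, il) (n0, x) =
        (S ++ List.replicate (x - p).toNat n0, E, x, n0) := by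
      simp [stepA, hx]
    have hB : stepB (q, ok, p) (n0, x) = (q ++ [(n0, x - p)], ok, x) := by
      simp [stepB]
      intro h'
      exact absurd h' (by omega)
    rw [hA, hB]
    refine ⟨rfl, ?_, ?_⟩
    · intro y hy
      rcases List.mem_append.mp hy with hmem | hmem
      · exact hq y hmem
      · simp at hmem; subst hmem; simp; omega
    · dsimp only
      rcases hinv with ⟨hok, hexp, hlen, hplen⟩ | ⟨hok, k, hk, hcase⟩
      · left
        refine ⟨?_, ?_, ?_, ?_⟩
        · rw [pairsAll_append_left S _ E hlen]; exact hok
        · have hq' : expand (q ++ [(n0, x - p)]) =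
              expand q ++ List.replicate (x - p).toNat n0 := by
            simp [expand]
          rw [hq', hexp, List.drop_append_of_le_length hlen]
        · simp only [List.length_append]; omega
        · simp only [List.length_append, List.length_replicate]
          push_cast
          omega
      · right
        refine ⟨hok, k, hk, ?_⟩
        rcases hcase with ⟨hkS, hbad⟩ | ⟨hkS, hbad⟩
        · left
          constructor
          · simp only [List.length_append]; omega
          · rw [List.getD_append _ _ _ _ hkS]; exact hbad
        · by_cases h2 : k < (S ++ List.replicate (x - p).toNat n0).length
          · left
            refine ⟨h2, ?_⟩
            rw [List.getD_append_right _ _ _ _ hkS]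
            have hklt : k - S.length < (x - p).toNat := by
              simp only [List.length_append, List.length_replicate] at h2; omega
            rw [List.getD_replicate _ hklt]
            omega
          · right
            simp only [List.length_append] at h2 ⊢
            exact ⟨by omega, by omega⟩
  · -- equal step: x = p
    subst hx
    have hA : stepA (S, E, p, il) (n0, p) = (S, E, p, n0) := by simp [stepA]
    have hB : stepB (q, ok, p) (n0, p) = (q, ok, p) := by simp [stepB]
    rw [hA, hB]
    refine ⟨rfl, hq, ?_⟩
    dsimp only
    rcases hinv with hgood | ⟨hok, k, hk, hcase⟩
    · exact Or.inl hgood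
    · right
      refine ⟨hok, k, hk, ?_⟩
      rcases hcase with ⟨hkS, hbad⟩ | ⟨hkS, hbad⟩
      · exact Or.inl ⟨hkS, hbad⟩
      · exact Or.inr ⟨hkS, by omega⟩
  · -- close step: x < p
    have hA : stepA (S, E, p, il) (n0, x) =
        (S, E ++ List.replicate (p - x).toNat (n0 - 1), x, n0) := by
      simp [stepA, hx, show ¬ p < x by omega]
    have hB : stepB (q, ok, p) (n0, x) =
        ((closeB (n0 - 1) q (p - x) ok).1, (closeB (n0 - 1) q (p - x) ok).2, x) := by
      simp [stepB, show x - p < 0 by omega]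
      intro h'
      exact absurd h' (by omega)
    rw [hA, hB]
    rcases hinv with ⟨hok, hexp, hlen, hplen⟩ | ⟨hok, k, hk, hcase⟩
    · have hlenq : ((expand q).length : Int) = p := by
        rw [hexp, List.length_drop]; omega
      by_cases hx0 : 0 ≤ x
      · obtain ⟨q', heq, hq', hexp'⟩ :=
          (closeB_spec (n0 - 1) q (p - x) ok hq (by omega)).1 (by omega)
        rw [heq]
        refine ⟨rfl, hq', Or.inl ⟨?_, ?_, ?_, ?_⟩⟩
        · dsimp only
          rw [pairsAll_append_right S E _ hlen, pairsAll_replicate, hok, hexp]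
        · dsimp only
          rw [hexp', hexp, List.drop_drop,
            show E.length + (p - x).toNat = (E ++ List.replicate (p - x).toNat (n0 - 1)).length
              from by simp only [List.length_append, List.length_replicate]]
        · dsimp only
          simp only [List.length_append, List.length_replicate]
          omega
        · dsimp only
          simp only [List.length_append, List.length_replicate]
          push_cast
          omega
      · have heq := (closeB_spec (n0 - 1) q (p - x) ok hq (by omega)).2 (by omega)
        rw [heq]
        refine ⟨rfl, by intro y hy; simp at hy, Or.inr ⟨rfl, S.length, ?_, Or.inr ⟨le_refl _, ?_⟩⟩⟩
        · dsimp only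
          simp only [List.length_append, List.length_replicate]
          omega
        · dsimp only
          rw [List.getD_append_right _ _ _ _ hlen]
          have hklt : S.length - E.length < (p - x).toNat := by omega
          rw [List.getD_replicate _ hklt]
          omega
    · subst hok
      refine ⟨rfl, closeB_posCnt _ _ _ _ hq, Or.inr ⟨closeB_false _ _ _, k, ?_, ?_⟩⟩
      · dsimp only
        simp only [List.length_append]
        omega
      · dsimp only
        rcases hcase with ⟨hkS, hbad⟩ | ⟨hkS, hbad⟩
        · exact Or.inl ⟨hkS, by rw [List.getD_append _ _ _ _ hk]; exact hbad⟩
        · exact Or.inr ⟨hkS, by rw [List.getD_append _ _ _ _ hk]; omega⟩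

theorem fold_inv : ∀ (xs : List Int) (n0 : Int) (a : List Int × List Int × Int × Int)
    (b : List (Int × Int) × Bool × Int), LoopInv n0 a b →
    LoopInv (n0 + xs.length) ((PySem.List.enumerate xs n0).foldl stepA a)
      ((PySem.List.enumerate xs n0).foldl stepB b) := by
  intro xs
  induction xs with
  | nil => intro n0 a b h; simpa [PySem.List.enumerate] using h
  | cons x xs ih =>
    intro n0 a b h
    rw [PySem.List.enumerate_cons, List.foldl_cons, List.foldl_cons]
    have hrec := ih (n0 + 1) _ _ (step_inv n0 x a b h)
    have harith : n0 + (((x :: xs).length : Nat) : Int) = (n0 + 1) + (xs.length : Int) := by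
      simp only [List.length_cons]
      push_cast
      ring
    rw [harith]
    exact hrec

theorem stepA_i (a : List Int × List Int × Int × Int) (ic : Int × Int) :
    (stepA a ic).2.2.2 = ic.1 := by
  obtain ⟨S, E, p, il⟩ := a
  obtain ⟨i, c⟩ := ic
  simp only [stepA]
  split_ifs <;> rfl

theorem fold_lastI : ∀ (xs : List Int) (n0 : Int) (a : List Int × List Int × Int × Int),
    xs ≠ [] → ((PySem.List.enumerate xs n0).foldl stepA a).2.2.2 = n0 + xs.length - 1 := by
  intro xs
  induction xs with
  | nil => intro n0 a h; exact absurd rfl h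
  | cons x xs ih =>
    intro n0 a _
    rw [PySem.List.enumerate_cons, List.foldl_cons]
    by_cases hxs : xs = []
    · subst hxs
      simp [PySem.List.enumerate, stepA_i]
    · rw [ih (n0 + 1) _ hxs]
      simp only [List.length_cons]
      push_cast
      ring

theorem check_spec_main (bag : List Int) (hbag : bag ≠ []) : check bag = check_alt bag := by
  have hInv0 : LoopInv 0 ([], [], 0, 0) ([], true, 0) := by
    refine ⟨rfl, ?_, Or.inl ⟨?_, ?_, ?_, ?_⟩⟩
    · intro y hy; simp at hy
    · simp [pairsAll]
    · simp [expand]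
    · simp
    · simp
  have hInv := fold_inv bag 0 ([], [], 0, 0) ([], true, 0) hInv0
  have hIl := fold_lastI bag 0 ([], [], 0, 0) hbag
  rcases hA : (PySem.List.enumerate bag 0).foldl stepA ([], [], 0, 0) with ⟨S, E, p, il⟩
  rcases hB : (PySem.List.enumerate bag 0).foldl stepB ([], true, 0) with ⟨q, ok, p'⟩
  rw [hA] at hInv hIl
  rw [hB] at hInv
  rw [zero_add] at hIl
  obtain ⟨hp, hq, hinv⟩ := hInv
  dsimp only at hp hq hinv hIl
  subst hp
  subst hIl
  unfold check check_alt
  rw [hA, hB]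
  dsimp only
  rw [zipAll_eq]
  rw [zero_add] at hinv
  rcases hinv with ⟨hok, hexp, hlen, hplen⟩ | ⟨hok, k, hk, hcase⟩
  · have hp0 : (0 : Int) ≤ p := by omega
    have hlenq : ((expand q).length : Int) = p := by
      rw [hexp, List.length_drop]; omega
    rcases eq_or_lt_of_le hp0 with hpz | hpz
    · have hq0 : q = [] := expand_nil_of_posCnt q hq
        (List.eq_nil_of_length_eq_zero (by omega))
      subst hq0
      rw [closeB_nonpos _ _ _ _ (by omega)]
      have hSE : S.length = E.length := by omega
      simp [show p.toNat = 0 by omega, hSE, show p ≥ 0 by omega, hok]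
    · obtain ⟨q', heq, hq', hexp'⟩ :=
        (closeB_spec ((bag.length : Int) - 1) q p ok hq hpz).1 (by omega)
      rw [heq]
      have hq'nil : q' = [] := expand_nil_of_posCnt q' hq' (by
        rw [hexp']
        apply List.drop_eq_nil_of_le
        omega)
      subst hq'nil
      dsimp only
      have htake : (expand q).take p.toNat = expand q := List.take_of_length_le (by omega)
      have hpa : pairsAll S (E ++ List.replicate p.toNat ((bag.length : Int) - 1)) =
          (ok && ((expand q).take p.toNat).all fun s => decide ((bag.length : Int) - 1 - s ≥ 2)) := by
        rw [pairsAll_append_right S E _ hlen, pairsAll_replicate, hok, ← hexp, htake]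
      rw [hpa]
      have hbeq : (S.length == (E ++ List.replicate p.toNat ((bag.length : Int) - 1)).length) = true := by
        simp [List.length_append]
        omega
      rw [hbeq]
      simp [show p ≥ 0 by omega]
  · subst hok
    rw [closeB_false]
    simp only [Bool.false_and]
    rcases hcase with ⟨hkS, hbad⟩ | ⟨hkS, hbad⟩
    · by_cases hL : S.length = (E ++ List.replicate p.toNat ((bag.length : Int) - 1)).length
      · have hfalse : pairsAll S (E ++ List.replicate p.toNat ((bag.length : Int) - 1)) = false :=
          pairsAll_false_of _ _ k hkS (by simp only [List.length_append]; omega)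
            (by rw [List.getD_append _ _ _ _ hk]; exact hbad)
        rw [hfalse, Bool.and_false]
      · have hbeq : (S.length == (E ++ List.replicate p.toNat ((bag.length : Int) - 1)).length) = false := by
          simpa using hL
        rw [hbeq, Bool.false_and]
    · have hbeq : (S.length == (E ++ List.replicate p.toNat ((bag.length : Int) - 1)).length) = false := by
        simp only [List.length_append, List.length_replicate, beq_eq_false_iff_ne, ne_eq]
        omega
      rw [hbeq, Bool.false_and]

-- ===== VERDICT (by name: the statement is the Claim_ definition above) =====
theorem check_spec : Claim_equal_check := by
  intro bag _ hbag
  show check bag = check_alt bag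
  exact check_spec_main bag hbag
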